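-- pv_equiv track=rewrite | github.com/MTemraz/algorithms-and-data-structures | Array/sort_by_another.py | sortByAnother
-- ===== SOURCE A (Python) =====
-- from collections import defaultdict
--
-- def sortByAnother(A,B):
--     # A = [3,7,1,5,3,5]
--     # B = [1,7,3,3,3,4,8] -> [3,7,1,4,8]
--     cache = defaultdict(lambda:0)
--     result = []
--     for element in B:
--         cache[element] += 1
--     for element in A:
--         if element in cache:
--             result += [element]*cache[element]
--             del cache[element]
--     remaining = sorted(cache.items())
--     for element,freq in remaining:
--         result += [element]*freq
--     return result
-- ===== SOURCE B (Python) =====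
-- def sortByAnother(A, B):
--     rank = {}
--     for i, x in enumerate(A):
--         rank.setdefault(x, i)
--     present = sorted([x for x in B if x in rank], key=lambda x: rank[x])
--     absent = sorted([x for x in B if x not in rank])
--     return present + absent
-- ===== Notes on version B (the rewrite author's own statement) =====
-- stated objective: simpler
-- what changed: Instead of counting B's elements, consuming counts while scanning A, and partially sorting the leftover dict items, B builds a first-occurrence rank index over A once and obtains the whole result as two key-based sorts of B itself (present elements by rank, absent elements by value) concatenated.
import Mathlib
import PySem

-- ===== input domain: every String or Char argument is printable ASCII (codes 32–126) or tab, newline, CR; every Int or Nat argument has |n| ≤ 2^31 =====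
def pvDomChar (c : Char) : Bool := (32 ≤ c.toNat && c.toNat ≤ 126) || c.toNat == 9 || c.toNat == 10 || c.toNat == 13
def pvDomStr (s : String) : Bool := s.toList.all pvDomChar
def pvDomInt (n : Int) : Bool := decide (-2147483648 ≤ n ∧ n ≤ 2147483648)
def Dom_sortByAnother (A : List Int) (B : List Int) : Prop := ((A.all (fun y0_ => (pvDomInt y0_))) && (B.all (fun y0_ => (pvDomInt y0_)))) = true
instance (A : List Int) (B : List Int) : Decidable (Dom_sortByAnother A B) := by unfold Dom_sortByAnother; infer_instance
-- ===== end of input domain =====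

-- B replaces A's count/consume/partial-sort pipeline with one rank index over A and two key-based
-- sorts of B (objective: simpler).

-- ===== PORT A =====
def sortByAnother (A : List Int) (B : List Int) : List Int :=
  -- cache = defaultdict(lambda:0); for element in B: cache[element] += 1
  let cache : PySem.Dict Int Int := B.foldl (fun d x => d.modify x 0 (· + 1)) PySem.Dict.empty
  -- for element in A: if element in cache: result += [element]*cache[element]; del cache[element]
  let st : PySem.Dict Int Int × List Int :=
    A.foldl (fun (s : PySem.Dict Int Int × List Int) e =>
      if s.1.contains e then
        (s.1.erase e, s.2 ++ PySem.List.pyRepeat [e] (s.1.getD e 0))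
      else s) (cache, ([] : List Int))
  -- remaining = sorted(cache.items()); for element,freq in remaining: result += [element]*freq
  let remaining := PySem.List.sorted2 st.1.items (fun p => p.1) (fun p => p.2)
  remaining.foldl (fun r p => r ++ PySem.List.pyRepeat [p.1] p.2) st.2

-- ===== PORT B =====
def sortByAnother_alt (A : List Int) (B : List Int) : List Int :=
  -- rank = {}; for i, x in enumerate(A): rank.setdefault(x, i)
  let rank : PySem.Dict Int Int :=
    (PySem.List.enumerate A).foldl (fun d p => d.setdefault p.2 p.1) PySem.Dict.empty
  -- present = sorted([x for x in B if x in rank], key=lambda x: rank[x])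
  -- (rank[x] never raises here: the comprehension keeps only x in rank, so getD's default is dead)
  let present := PySem.List.sorted (B.filter (fun x => rank.contains x)) (fun x => rank.getD x 0)
  -- absent = sorted([x for x in B if x not in rank])
  let absent := PySem.List.sorted (B.filter (fun x => !rank.contains x)) (fun x => x)
  present ++ absent

-- ===== PRECONDITION & SPEC =====
def Spec_sortByAnother (A : List Int) (B : List Int) (out : List Int) : Prop := out = sortByAnother_alt A B
instance (A : List Int) (B : List Int) (out : List Int) : Decidable (Spec_sortByAnother A B out) := by unfold Spec_sortByAnother; infer_instance

-- ===== CLAIM (what is proved, stated in full; the proofs are below) =====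
def Claim_equal_sortByAnother : Prop := ∀ (A : List Int) (B : List Int), Dom_sortByAnother A B → Spec_sortByAnother A B (sortByAnother A B)

-- ===== LEMMAS AND PROOFS =====

-- B's rank dict, as built by the port of B
def pvRank (A : List Int) : PySem.Dict Int Int :=
  (PySem.List.enumerate A).foldl (fun d p => d.setdefault p.2 p.1) PySem.Dict.empty

theorem pvRank_get?_aux (t : List Int) (d : PySem.Dict Int Int) (s : Int) (x : Int) :
    ((PySem.List.enumerate t s).foldl (fun d p => d.setdefault p.2 p.1) d).get? x
      = (d.get? x).or (if x ∈ t then some (s + (t.idxOf x : Int)) else none) := by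
  induction t generalizing d s with
  | nil => simp [PySem.List.enumerate_nil]
  | cons a t ih =>
    rw [PySem.List.enumerate_cons, List.foldl_cons, ih]
    by_cases hx : x = a
    · subst hx
      rw [PySem.Dict.get?_setdefault_self]
      simp only [List.mem_cons, true_or, if_pos, List.idxOf_cons, beq_self_eq_true, cond_true]
      cases hdx : d.get? x <;> simp [Option.or]
    · rw [PySem.Dict.get?_setdefault_of_ne _ _ hx]
      have hbeq : (a == x) = false := by simp [Ne.symm hx]
      simp only [List.mem_cons, hx, false_or, List.idxOf_cons, hbeq, cond_false]
      congr 1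
      split_ifs with hm
      · congr 1; push_cast; ring
      · rfl

theorem pvRank_get? (A : List Int) (x : Int) :
    (pvRank A).get? x = if x ∈ A then some ((A.idxOf x : Nat) : Int) else none := by
  unfold pvRank
  rw [pvRank_get?_aux, PySem.Dict.get?_empty]
  split_ifs with h <;> simp

theorem pvRank_contains (A : List Int) (x : Int) :
    (pvRank A).contains x = decide (x ∈ A) := by
  rw [PySem.Dict.contains_eq_isSome_get?, pvRank_get?]
  by_cases h : x ∈ A <;> simp [h]

theorem pvRank_getD_of_mem (A : List Int) (x : Int) (h : x ∈ A) :
    (pvRank A).getD x 0 = ((A.idxOf x : Nat) : Int) := by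
  rw [PySem.Dict.getD_eq_get?_getD, pvRank_get?, if_pos h]
  rfl

-- erase, characterised through lookups (erase filters the item list)
theorem pvGet?Erase (c : PySem.Dict Int Int) (e x : Int) :
    (c.erase e).get? x = if x = e then none else c.get? x := by
  obtain ⟨l⟩ := c
  induction l with
  | nil => simp [PySem.Dict.erase, PySem.Dict.get?]
  | cons p t ih =>
    show (PySem.Dict.mk ((p :: t).filter (fun q => !(q.1 == e)))).get? x = _
    by_cases hpe : p.1 = e
    · rw [List.filter_cons_of_neg (by simp [hpe])]
      rw [show (PySem.Dict.mk (t.filter (fun q => !(q.1 == e)))).get? x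
            = (PySem.Dict.mk t |>.erase e).get? x from rfl, ih]
      split_ifs with hx
      · rfl
      · rw [PySem.Dict.get?_mk_cons]
        simp [hpe, Ne.symm hx]
    · rw [List.filter_cons_of_pos (by simp [hpe])]
      rw [PySem.Dict.get?_mk_cons]
      by_cases hpx : p.1 = x
      · have hxe : x ≠ e := fun h => hpe (hpx.trans h)
        rw [if_neg hxe]
        simp [PySem.Dict.get?, hpx]
      · rw [if_neg (by simpa using hpx)]
        rw [show (PySem.Dict.mk (t.filter (fun q => !(q.1 == e)))).get? x
              = (PySem.Dict.mk t |>.erase e).get? x from rfl, ih]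
        split_ifs with hx
        · rfl
        · rw [PySem.Dict.get?_mk_cons, if_neg (by simpa using hpx)]

theorem pvContainsErase (c : PySem.Dict Int Int) (e x : Int) :
    (c.erase e).contains x = (!(x == e) && c.contains x) := by
  rw [PySem.Dict.contains_eq_isSome_get?, PySem.Dict.contains_eq_isSome_get?, pvGet?Erase]
  by_cases hx : x = e <;> simp [hx]

theorem pvGetDErase (c : PySem.Dict Int Int) (e x : Int) (hx : x ≠ e) :
    (c.erase e).getD x 0 = c.getD x 0 := by
  rw [PySem.Dict.getD_eq_get?_getD, PySem.Dict.getD_eq_get?_getD, pvGet?Erase, if_neg hx]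

theorem pvKeysEraseNodup (c : PySem.Dict Int Int) (e : Int) (h : c.keys.Nodup) :
    (c.erase e).keys.Nodup := by
  have hs : (c.erase e).items.Sublist c.items := List.filter_sublist
  exact (hs.map Prod.fst).nodup h

-- A's main loop, computed in closed form
theorem pvLoopA (L : List Int) (c : PySem.Dict Int Int) (r : List Int) (hnd : c.keys.Nodup) :
    L.foldl (fun (s : PySem.Dict Int Int × List Int) e =>
        if s.1.contains e then
          (s.1.erase e, s.2 ++ PySem.List.pyRepeat [e] (s.1.getD e 0))
        else s) (c, r)
      = (PySem.Dict.mk (c.items.filter (fun p => !decide (p.1 ∈ L))),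
         r ++ ((PySem.Set.ofList L).filter (fun e => c.contains e)).flatMap
                (fun e => PySem.List.pyRepeat [e] (c.getD e 0))) := by
  induction L generalizing c r with
  | nil => simp [PySem.Set.ofList_nil]
  | cons e t ih =>
    rw [List.foldl_cons]
    by_cases hc : c.contains e = true
    · simp only [hc, if_pos]
      rw [ih (c.erase e) _ (pvKeysEraseNodup c e hnd), Prod.mk.injEq]
      refine ⟨?_, ?_⟩
      · -- dict component
        show PySem.Dict.mk ((c.items.filter (fun q => !(q.1 == e))).filter
              (fun p => !decide (p.1 ∈ t))) = _
        congr 1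
        rw [List.filter_filter]
        apply List.filter_congr
        intro p _
        by_cases hpe : p.1 = e
        · simp [hpe]
        · simp [hpe, List.mem_cons]
      · -- result component
        rw [PySem.Set.ofList_cons, List.filter_cons_of_pos hc, List.flatMap_cons,
          ← List.append_assoc]
        congr 1
        have hfe : ((PySem.Set.ofList t).discard e).filter (fun x => c.contains x)
            = (PySem.Set.ofList t).filter (fun x => (c.erase e).contains x) := by
          show (List.filter (fun y => !(y == e)) (PySem.Set.ofList t)).filter _ = _
          rw [List.filter_filter]
          apply List.filter_congr
          intro y _
          rw [pvContainsErase]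
          exact Bool.and_comm _ _
        rw [hfe, List.flatMap_def, List.flatMap_def]
        congr 1
        apply List.map_congr_left
        intro y hy
        have hyne : y ≠ e := by
          have h2 := (List.mem_filter.mp hy).2
          rw [pvContainsErase] at h2
          intro h
          rw [h] at h2
          simp at h2
        rw [pvGetDErase c e y hyne]
    · simp only [hc, if_neg, Bool.false_eq_true, not_false_eq_true]
      rw [ih c r hnd, Prod.mk.injEq]
      have hkey : ∀ p ∈ c.items, p.1 ≠ e := by
        intro p hp hpe
        have : p.1 ∈ c.keys := PySem.Dict.mem_keys_of_mem_items c hp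
        rw [← PySem.Dict.contains_iff_mem_keys] at this
        rw [hpe] at this
        exact absurd this (by simp [hc])
      refine ⟨?_, ?_⟩
      · congr 1
        apply List.filter_congr
        intro p hp
        simp [List.mem_cons, hkey p hp]
      · rw [PySem.Set.ofList_cons, List.filter_cons_of_neg (by simp [hc])]
        have hdisc : List.filter (fun x => c.contains x) ((PySem.Set.ofList t).discard e)
            = List.filter (fun x => c.contains x) (PySem.Set.ofList t) := by
          show (List.filter (fun y => !(y == e)) (PySem.Set.ofList t)).filter _ = _
          rw [List.filter_filter]
          apply List.filter_congr
          intro y _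
          by_cases hcy : c.contains y = true
          · have : y ≠ e := fun h => by rw [h] at hcy; simp [hcy] at hc
            simp [this, hcy]
          · simp [Bool.eq_false_iff.mpr hcy]
        rw [hdisc]

-- equality of sorted lists from a permutation, pairwise ≤ on both sides, key injective on l₁'s elements
theorem pvEqOfPermPairwiseLe {α κ : Type} [LinearOrder κ] (key : α → κ) :
    ∀ (l₁ l₂ : List α), (∀ a ∈ l₁, ∀ b ∈ l₁, key a = key b → a = b) → l₁.Perm l₂ →
      l₁.Pairwise (fun a b => key a ≤ key b) → l₂.Pairwise (fun a b => key a ≤ key b) → l₁ = l₂ := by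
  intro l₁
  induction l₁ with
  | nil => intro l₂ _ hp _ _; exact hp.nil_eq
  | cons a t ih =>
    intro l₂ hinj hp h₁ h₂
    cases l₂ with
    | nil => exact absurd hp.symm.nil_eq (by simp)
    | cons b t₂ =>
      by_cases hab : a = b
      · subst hab
        have := ih t₂
          (fun x hx y hy => hinj x (List.mem_cons_of_mem _ hx) y (List.mem_cons_of_mem _ hy))
          hp.cons_inv (List.pairwise_cons.mp h₁).2 (List.pairwise_cons.mp h₂).2
        rw [this]
      · have hb : b ∈ t := by
          have hmem : b ∈ a :: t := hp.mem_iff.mpr (List.mem_cons_self ..)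
          rcases List.mem_cons.mp hmem with h | h
          · exact absurd h.symm hab
          · exact h
        have ha : a ∈ t₂ := by
          have hmem : a ∈ b :: t₂ := hp.subset (List.mem_cons_self ..)
          rcases List.mem_cons.mp hmem with h | h
          · exact absurd h hab
          · exact h
        have h1 : key a ≤ key b := (List.pairwise_cons.mp h₁).1 b hb
        have h2 : key b ≤ key a := (List.pairwise_cons.mp h₂).1 a ha
        exact absurd (hinj a (List.mem_cons_self ..) b (List.mem_cons_of_mem _ hb)
          (le_antisymm h1 h2)) hab

theorem pvInsertByCongr {α : Type} (f g : α → α → Bool) (x : α) :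
    ∀ (ys : List α), (∀ y ∈ ys, f x y = g x y) →
      PySem.List.insertBy f x ys = PySem.List.insertBy g x ys := by
  intro ys
  induction ys with
  | nil => intro _; rfl
  | cons y ys ih =>
    intro h
    show (if f x y then x :: y :: ys else y :: PySem.List.insertBy f x ys)
      = (if g x y then x :: y :: ys else y :: PySem.List.insertBy g x ys)
    rw [h y (List.mem_cons_self ..)]
    split
    · rfl
    · rw [ih (fun z hz => h z (List.mem_cons_of_mem _ hz))]

theorem pvFoldlInsertByCongr {α : Type} (f g : α → α → Bool) (S : List α) :
    ∀ (L acc : List α), (∀ a ∈ S, ∀ b ∈ S, f a b = g a b) → (∀ a ∈ L, a ∈ S) → (∀ a ∈ acc, a ∈ S) →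
      L.foldl (fun acc x => PySem.List.insertBy f x acc) acc
        = L.foldl (fun acc x => PySem.List.insertBy g x acc) acc := by
  intro L
  induction L with
  | nil => intro acc _ _ _; rfl
  | cons x t ih =>
    intro acc hS hL hacc
    rw [List.foldl_cons, List.foldl_cons,
      pvInsertByCongr f g x acc (fun y hy => hS x (hL x (List.mem_cons_self ..)) y (hacc y hy))]
    exact ih (PySem.List.insertBy g x acc) hS (fun a ha => hL a (List.mem_cons_of_mem _ ha))
      (fun a ha => by
        rcases (PySem.List.mem_insertBy g x a acc).mp ha with h | h
        · exact h ▸ hL x (List.mem_cons_self ..)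
        · exact hacc a h)

-- sorted2 over pairs with pairwise-distinct first components is sorted by the first component
theorem pvSorted2EqSorted (xs : List (Int × Int))
    (h : ∀ a ∈ xs, ∀ b ∈ xs, a.1 = b.1 → a = b) :
    PySem.List.sorted2 xs (fun p => p.1) (fun p => p.2) = PySem.List.sorted xs (fun p => p.1) := by
  have h1 : PySem.List.sorted2 xs (fun p => p.1) (fun p => p.2)
      = xs.foldl (fun acc x => PySem.List.insertBy
          (fun a b => decide (a.1 < b.1) || (!decide (b.1 < a.1) && decide (a.2 < b.2))) x acc)
          [] := rfl
  rw [h1, PySem.List.sorted_eq_foldl_insertBy]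
  refine pvFoldlInsertByCongr _ _ xs xs [] ?_ (fun a ha => ha) (fun a ha => absurd ha (by simp))
  intro a ha b hb
  rcases lt_trichotomy a.1 b.1 with hlt | heq | hgt
  · simp [hlt]
  · have hq : a = b := h a ha b hb heq
    subst hq
    simp
  · have hnl : ¬a.1 < b.1 := not_lt.mpr hgt.le
    simp [hgt, hnl]

theorem pvCountFlatMapReplicate (l : List Int) (n : Int → Nat) (v : Int) (hnd : l.Nodup) :
    (l.flatMap (fun e => List.replicate (n e) e)).count v = if v ∈ l then n v else 0 := by
  revert hnd
  induction l with
  | nil => intro _; simp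
  | cons e t ih =>
    intro hnd
    rw [List.flatMap_cons, List.count_append, List.count_replicate,
      ih (List.nodup_cons.mp hnd).2]
    by_cases hv : v = e
    · subst hv
      have hvt : v ∉ t := (List.nodup_cons.mp hnd).1
      simp [hvt, List.mem_cons]
    · simp [hv, Ne.symm hv, List.mem_cons]

theorem pvPairwiseFlatMapReplicate (l : List Int) (n : Int → Nat) (k : Int → Int)
    (h : l.Pairwise (fun a b => k a < k b)) :
    (l.flatMap (fun e => List.replicate (n e) e)).Pairwise (fun a b => k a ≤ k b) := by
  revert h
  induction l with
  | nil => intro _; simp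
  | cons e t ih =>
    intro h
    rw [List.flatMap_cons, List.pairwise_append]
    refine ⟨?_, ih (List.pairwise_cons.mp h).2, ?_⟩
    · exact List.pairwise_replicate.mpr (Or.inr (le_refl (k e)))
    · intro x hx y hy
      have hxe : x = e := List.eq_of_mem_replicate hx
      rcases List.mem_flatMap.mp hy with ⟨b, hb, hyb⟩
      have hyb' : y = b := List.eq_of_mem_replicate hyb
      subst hxe
      rw [hyb']
      exact ((List.pairwise_cons.mp h).1 b hb).le

theorem pvOfListPairwiseIdxOf (A : List Int) :
    (PySem.Set.ofList A).Pairwise (fun a b => A.idxOf a < A.idxOf b) := by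
  induction A with
  | nil => rw [PySem.Set.ofList_nil]; exact List.Pairwise.nil
  | cons e t ih =>
    rw [PySem.Set.ofList_cons, List.pairwise_cons]
    constructor
    · intro b hb
      have hb' : b ∈ PySem.Set.ofList t ∧ b ≠ e := by
        simpa [PySem.Set.discard, List.mem_filter] using hb
      have h2 : (e == b) = false := by simpa using (Ne.symm hb'.2)
      rw [List.idxOf_cons, List.idxOf_cons, beq_self_eq_true, cond_true, h2, cond_false]
      exact Nat.succ_pos _
    · refine (ih.filter (fun y => !(y == e))).imp_of_mem ?_
      intro x y hx hy hR
      have hx2 : x ∈ PySem.Set.ofList t ∧ x ≠ e := by simpa [List.mem_filter] using hx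
      have hy2 : y ∈ PySem.Set.ofList t ∧ y ≠ e := by simpa [List.mem_filter] using hy
      have hex : (e == x) = false := by simpa using (Ne.symm hx2.2)
      have hey : (e == y) = false := by simpa using (Ne.symm hy2.2)
      rw [List.idxOf_cons, List.idxOf_cons, hex, cond_false, hey, cond_false]
      exact Nat.succ_lt_succ hR

-- canonical middle forms shared by both ports
def pvP (A B : List Int) : List Int :=
  ((PySem.Set.ofList A).filter (fun e => B.contains e)).flatMap
    (fun e => List.replicate (B.count e) e)

def pvS (A B : List Int) : List Int :=
  PySem.List.sorted ((PySem.Set.ofList B).filter (fun k => !decide (k ∈ A))) (fun x => x)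

def pvT (A B : List Int) : List Int :=
  (pvS A B).flatMap (fun e => List.replicate (B.count e) e)

theorem pvSNodup (A B : List Int) : (pvS A B).Nodup :=
  ((PySem.List.sorted_perm _ _ false).nodup_iff).mpr ((PySem.Set.nodup_ofList B).filter _)

theorem pvSPairwiseLt (A B : List Int) : (pvS A B).Pairwise (fun a b => a < b) := by
  have hle := PySem.List.sorted_pairwise
    ((PySem.Set.ofList B).filter (fun k => !decide (k ∈ A))) (fun x => x)
  have hnd : (pvS A B).Pairwise (fun a b => a ≠ b) := pvSNodup A B
  exact (hle.and hnd).imp (fun hab => lt_of_le_of_ne hab.1 hab.2)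

theorem pvItemsMk (l : List (Int × Int)) : (PySem.Dict.mk l).items = l := rfl

theorem pvASide (A B : List Int) : sortByAnother A B = pvP A B ++ pvT A B := by
  simp only [sortByAnother]
  rw [← PySem.Dict.counter_eq_foldl,
    pvLoopA A (PySem.Dict.counter B) [] (PySem.Dict.nodup_keys_counter B)]
  dsimp only
  rw [pvItemsMk, List.nil_append]
  have hitems : ((PySem.Dict.counter B).items.filter (fun p => !decide (p.1 ∈ A)))
      = ((PySem.Set.ofList B).filter (fun k => !decide (k ∈ A))).map
          (fun k => (k, (B.count k : Int))) := by
    rw [PySem.Dict.items_counter, List.filter_map]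
    rfl
  rw [hitems]
  have hdist : ∀ a ∈ ((PySem.Set.ofList B).filter (fun k => !decide (k ∈ A))).map
        (fun k => (k, (B.count k : Int))),
      ∀ b ∈ ((PySem.Set.ofList B).filter (fun k => !decide (k ∈ A))).map
        (fun k => (k, (B.count k : Int))), a.1 = b.1 → a = b := by
    intro a ha b hb hab
    rcases List.mem_map.mp ha with ⟨k1, _, rfl⟩
    rcases List.mem_map.mp hb with ⟨k2, _, rfl⟩
    simp only at hab
    simp [hab]
  rw [pvSorted2EqSorted _ hdist]
  have hsm : PySem.List.sorted (((PySem.Set.ofList B).filter (fun k => !decide (k ∈ A))).map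
        (fun k => (k, (B.count k : Int)))) (fun p => p.1)
      = (pvS A B).map (fun k => (k, (B.count k : Int))) := by
    apply PySem.List.sorted_eq_of_perm_of_pairwise_lt
    · exact (PySem.List.sorted_perm _ _ false).map _
    · rw [List.pairwise_map]
      exact pvSPairwiseLt A B
  rw [hsm, PySem.List.foldl_append_eq_flatMap, List.flatMap_map]
  simp only [pvP, pvT, PySem.Dict.contains_counter, PySem.Dict.getD_counter,
    PySem.List.pyRepeat_singleton, Int.toNat_natCast]

theorem pvBSide (A B : List Int) :
    sortByAnother_alt A B
      = PySem.List.sorted (B.filter (fun x => decide (x ∈ A))) (fun x => (pvRank A).getD x 0)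
        ++ PySem.List.sorted (B.filter (fun x => !decide (x ∈ A))) (fun x => x) := by
  simp only [sortByAnother_alt]
  rw [show ((PySem.List.enumerate A).foldl (fun d p => d.setdefault p.2 p.1) PySem.Dict.empty)
      = pvRank A from rfl]
  simp only [pvRank_contains]

theorem pvPresent (A B : List Int) :
    pvP A B = PySem.List.sorted (B.filter (fun x => decide (x ∈ A)))
      (fun x => (pvRank A).getD x 0) := by
  have hidx : ∀ x ∈ A, ∀ y ∈ A, A.idxOf x = A.idxOf y → x = y := by
    intro x hx y hy h
    have hxl : A.idxOf x < A.length := List.idxOf_lt_length_of_mem hx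
    have hyl : A.idxOf y < A.length := List.idxOf_lt_length_of_mem hy
    have h1 := List.getElem_idxOf hxl
    have h2 := List.getElem_idxOf hyl
    rw [← h1, ← h2]
    congr 1
  apply pvEqOfPermPairwiseLe (fun x => (pvRank A).getD x 0)
  · intro a ha b hb hk
    have haAB : a ∈ A ∧ a ∈ B := by
      rcases List.mem_flatMap.mp ha with ⟨e, he, hae⟩
      have hae' : a = e := List.eq_of_mem_replicate hae
      subst hae'
      have hm := List.mem_filter.mp he
      exact ⟨(PySem.Set.mem_ofList A a).mp hm.1, by simpa using hm.2⟩
    have hbAB : b ∈ A ∧ b ∈ B := by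
      rcases List.mem_flatMap.mp hb with ⟨e, he, hbe⟩
      have hbe' : b = e := List.eq_of_mem_replicate hbe
      subst hbe'
      have hm := List.mem_filter.mp he
      exact ⟨(PySem.Set.mem_ofList A b).mp hm.1, by simpa using hm.2⟩
    rw [pvRank_getD_of_mem A a haAB.1, pvRank_getD_of_mem A b hbAB.1] at hk
    exact hidx a haAB.1 b hbAB.1 (by exact_mod_cast hk)
  · rw [List.perm_iff_count]
    intro v
    unfold pvP
    rw [pvCountFlatMapReplicate _ _ _ ((PySem.Set.nodup_ofList A).filter _),
      (PySem.List.sorted_perm _ _ false).count_eq v]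
    by_cases hvA : v ∈ A
    · by_cases hvB : v ∈ B
      · have hmem : v ∈ (PySem.Set.ofList A).filter (fun e => B.contains e) := by
          simp [List.mem_filter, PySem.Set.mem_ofList, hvA, hvB]
        rw [if_pos hmem, List.count_filter (by simpa using hvA)]
      · have h0 : B.count v = 0 := List.count_eq_zero_of_not_mem hvB
        have hr : (B.filter (fun x => decide (x ∈ A))).count v = 0 := by
          apply List.count_eq_zero_of_not_mem
          intro hm
          exact hvB (List.mem_of_mem_filter hm)
        rw [hr]
        split_ifs with h
        · exact h0
        · rfl
    · have hnm : v ∉ (PySem.Set.ofList A).filter (fun e => B.contains e) := by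
        simp [List.mem_filter, PySem.Set.mem_ofList, hvA]
      have hr : (B.filter (fun x => decide (x ∈ A))).count v = 0 := by
        apply List.count_eq_zero_of_not_mem
        intro hm
        exact hvA (by simpa using (List.mem_filter.mp hm).2)
      rw [if_neg hnm, hr]
  · have h1 : ((PySem.Set.ofList A).filter (fun e => B.contains e)).Pairwise
        (fun a b => (pvRank A).getD a 0 < (pvRank A).getD b 0) := by
      refine ((pvOfListPairwiseIdxOf A).filter (fun e => B.contains e)).imp_of_mem ?_
      intro x y hx hy hR
      have hxA : x ∈ A := (PySem.Set.mem_ofList A x).mp (List.mem_filter.mp hx).1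
      have hyA : y ∈ A := (PySem.Set.mem_ofList A y).mp (List.mem_filter.mp hy).1
      rw [pvRank_getD_of_mem A x hxA, pvRank_getD_of_mem A y hyA]
      exact_mod_cast hR
    exact pvPairwiseFlatMapReplicate _ _ _ h1
  · exact PySem.List.sorted_pairwise _ _

theorem pvAbsent (A B : List Int) :
    pvT A B = PySem.List.sorted (B.filter (fun x => !decide (x ∈ A))) (fun x => x) := by
  apply pvEqOfPermPairwiseLe (fun x : Int => x)
  · exact fun a _ b _ h => h
  · rw [List.perm_iff_count]
    intro v
    unfold pvT
    rw [pvCountFlatMapReplicate _ _ _ (pvSNodup A B),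
      (PySem.List.sorted_perm _ _ false).count_eq v]
    have hmem : v ∈ pvS A B ↔ v ∈ B ∧ v ∉ A := by
      unfold pvS
      rw [PySem.List.mem_sorted]
      simp [List.mem_filter, PySem.Set.mem_ofList]
    by_cases hv : v ∈ B ∧ v ∉ A
    · rw [if_pos (hmem.mpr hv), List.count_filter (by simp [hv.2])]
    · rw [if_neg (fun h => hv (hmem.mp h))]
      have hr : (B.filter (fun x => !decide (x ∈ A))).count v = 0 := by
        apply List.count_eq_zero_of_not_mem
        intro hm
        rcases List.mem_filter.mp hm with ⟨h1, h2⟩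
        exact hv ⟨h1, by simpa using h2⟩
      rw [hr]
  · exact pvPairwiseFlatMapReplicate _ _ _ (pvSPairwiseLt A B)
  · exact PySem.List.sorted_pairwise _ _

-- ===== VERDICT (by name: the statement is the Claim_ definition above) =====
theorem sortByAnother_spec : Claim_equal_sortByAnother := by
  intro A B _
  unfold Spec_sortByAnother
  rw [pvASide, pvBSide, pvPresent, pvAbsent]
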